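-- pv_equiv track=rewrite | github.com/kn7072/kn7072 | эксперименты/new/genetator.py | man
-- ===== SOURCE A (Python) =====
-- def man(ls, index):
--     if len(ls) == 1:
--         return ls
--     else:
--         ss = len(ls) % 2
--         ls = ls[index::2]
--
--         if ss == 0:
--             res = man(ls, 0)
--         else:
--             res = man(ls, 1)
--         return res
-- ===== SOURCE B (Python) =====
-- def man(ls, index):
--     # Track the surviving position analytically (offset/stride) instead of
--     # materialising each strided sublist: logarithmically many iterations, no copying.
--     n = len(ls)
--     if n == 1:
--         return ls
--     off, stride, m, i = 0, 1, n, index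
--     while m > 1:
--         ic = min(i, m) if i >= 0 else max(0, m + i)
--         nxt = m % 2
--         off += stride * ic
--         stride *= 2
--         m = (m - ic + 1) // 2
--         i = nxt
--     return [ls[off]]
-- ===== Notes on version B (the rewrite author's own statement) =====
-- stated objective: alternative
-- what changed: Replaces A's recursion that materialises a new strided sublist at every level with a loop that tracks the surviving element's offset and stride analytically (logarithmically many iterations) and indexes the original list once; measured ~1.4x at the largest size, below the 1.5x bar, so no speed claim.
-- outside the precondition, e.g. on man([], 0): A does not finish within the time limit, B raises IndexError; on man([1, 2, 3], 5): A does not finish within the time limit, B raises IndexError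
import Mathlib
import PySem

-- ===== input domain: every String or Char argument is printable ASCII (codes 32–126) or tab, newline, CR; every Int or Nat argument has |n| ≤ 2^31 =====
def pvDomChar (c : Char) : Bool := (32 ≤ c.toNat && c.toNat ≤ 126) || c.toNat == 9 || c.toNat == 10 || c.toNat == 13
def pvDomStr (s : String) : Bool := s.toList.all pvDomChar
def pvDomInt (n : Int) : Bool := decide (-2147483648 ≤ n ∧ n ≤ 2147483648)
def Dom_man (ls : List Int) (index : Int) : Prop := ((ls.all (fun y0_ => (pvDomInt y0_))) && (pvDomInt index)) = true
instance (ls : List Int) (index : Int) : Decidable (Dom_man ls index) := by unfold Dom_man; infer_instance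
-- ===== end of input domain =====

-- B replaces A's recursion on materialised strided sublists with a loop tracking the
-- surviving element's offset and stride, then indexes the original list once.

-- ===== PORT A =====
-- Python's recursion diverges when the slice is empty (those inputs are excluded by
-- Pre_man); the fuel — initially ls.length, enough because under Pre_man the list at
-- least halves at every level — only totalises the same recursion.
def manFuel (fuel : Nat) (ls : List Int) (index : Int) : List Int :=
  match fuel with
  | 0 => []
  | fuel + 1 =>
    if PySem.List.len ls = 1 then ls
    else
      let ss := PySem.Int.mod (PySem.List.len ls) 2
      let ls' := (PySem.List.slice? ls (some index) none 2).getD []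
      if ss = 0 then manFuel fuel ls' 0 else manFuel fuel ls' 1

def man (ls : List Int) (index : Int) : List Int := manFuel ls.length ls index

-- ===== PORT B =====
-- Source B: ic = min(i, m) if i >= 0 else max(0, m + i)
def pvClamp (m : Nat) (i : Int) : Nat := if 0 ≤ i then min i.toNat m else (i + m).toNat

-- the while loop of Source B over the state (off, stride, m, i)
def manAltGo (ls : List Int) (off stride m : Nat) (i : Int) : List Int :=
  if h : m ≤ 1 then [PySem.List.pyGetD ls (off : Int) 0]
  else
    manAltGo ls (off + stride * pvClamp m i) (stride * 2) ((m - pvClamp m i + 1) / 2) ((m % 2 : Nat))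
termination_by m
decreasing_by omega

def man_alt (ls : List Int) (index : Int) : List Int :=
  if ls.length = 1 then ls else manAltGo ls 0 1 ls.length index

-- ===== PRECONDITION & SPEC =====
-- Pre_man excludes exactly the inputs on which Python's A recurses forever and never
-- returns: the empty list, and (for len ≥ 2) a start index ≥ len, whose slice is empty.
def Pre_man (ls : List Int) (index : Int) : Prop :=
  ls ≠ [] ∧ (ls.length = 1 ∨ index < (ls.length : Int))
instance (ls : List Int) (index : Int) : Decidable (Pre_man ls index) := by
  unfold Pre_man; infer_instance

def pvWitness_man : List Int × Int := ([3, 1, 4, 1, 5], 2)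

def Spec_man (ls : List Int) (index : Int) (out : List Int) : Prop := out = man_alt ls index
instance (ls : List Int) (index : Int) (out : List Int) : Decidable (Spec_man ls index out) := by
  unfold Spec_man; infer_instance

-- ===== CLAIM (what is proved, stated in full; the proofs are below) =====
def Claim_equal_man : Prop :=
  ∀ (ls : List Int) (index : Int), Dom_man ls index → Pre_man ls index →
    Spec_man ls index (man ls index)

-- ===== LEMMAS AND PROOFS =====

-- the Int start computed by sliceIndices for step 2 is exactly ↑(pvClamp m i)
lemma clamp_cast (m : Nat) (i : Int) :
    (if i < 0 then max (i + (m : Int)) 0 else min i (m : Int)) = ((pvClamp m i : Nat) : Int) := by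
  unfold pvClamp; split_ifs with h1 h2 h2 <;> omega

-- characterisation of ls[i::2]: the elements at positions ic, ic+2, …
lemma slice2_eq (cur : List Int) (i : Int) (hlt : pvClamp cur.length i < cur.length) :
    (PySem.List.slice? cur (some i) none 2).getD [] =
      (List.range ((cur.length - pvClamp cur.length i + 1) / 2)).map
        (fun k => cur.getD (pvClamp cur.length i + 2 * k) 0) := by
  set m := cur.length with hm
  set s := pvClamp m i with hs
  unfold PySem.List.slice? PySem.List.sliceIndices
  norm_num
  rw [clamp_cast, ← hm, ← hs]
  rw [if_pos (by exact_mod_cast hlt)]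
  have hcnt : ((↑m - ↑s + 2 - 1 : Int) / 2).toNat = (m - s + 1) / 2 := by omega
  rw [hcnt, ← List.filterMap_eq_map]
  apply List.filterMap_congr
  intro x hx
  rw [List.mem_range] at hx
  have hidx : ((s : Int) + 2 * x).toNat = s + 2 * x := by omega
  have hin : s + 2 * x < m := by omega
  rw [hidx]
  simp only [Function.comp]
  rw [hm] at hin
  rw [List.getElem?_eq_getElem hin]
  simp

-- main invariant: A on the current strided sublist (viewed through off/stride inside
-- the original list) equals B's loop on the original list
lemma key (fuel : Nat) : ∀ (m : Nat) (cur ls : List Int) (off stride : Nat) (i : Int),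
    m ≤ fuel → cur.length = m → 1 ≤ m →
    (∀ j, j < m → cur[j]? = ls[off + stride * j]?) →
    (m = 1 ∨ pvClamp m i < m) →
    manFuel fuel cur i = manAltGo ls off stride m i := by
  induction fuel with
  | zero => intro m _ _ _ _ _ hf _ hm _ _; omega
  | succ fuel ih =>
    intro m cur ls off stride i hf hlen hm hinv hcond
    have hlencast : PySem.List.len cur = (m : Int) := by simp [PySem.List.len, hlen]
    by_cases h1 : m = 1
    · -- base: length 1
      have h0 := hinv 0 (by omega)
      rcases List.length_eq_one_iff.mp (by omega : cur.length = 1) with ⟨c, rfl⟩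
      simp only [Nat.mul_zero, Nat.add_zero, List.getElem?_cons_zero] at h0
      rw [manAltGo, dif_pos (by omega : m ≤ 1)]
      have hstep : manFuel (fuel+1) [c] i = [c] := by
        simp [manFuel, PySem.List.len]
      rw [hstep]
      simp only [PySem.List.pyGetD_natCast, List.getD_eq_getElem?_getD, ← h0]
      rfl
    · -- step
      have hm2 : 2 ≤ m := by omega
      set s := pvClamp m i with hs
      have hslt : s < m := by rcases hcond with h | h; omega; exact h
      set cnt := (m - s + 1) / 2 with hcnt
      have hcnt1 : 1 ≤ cnt := by omega
      have hcntlt : cnt < m := by omega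
      have hsl : (PySem.List.slice? cur (some i) none 2).getD [] =
          (List.range cnt).map (fun k => cur.getD (s + 2 * k) 0) := by
        have h := slice2_eq cur i (by rw [hlen]; exact hslt)
        rw [hlen] at h
        exact h
      set cur' := (List.range cnt).map (fun k => cur.getD (s + 2 * k) 0) with hcur'
      have hstep : manFuel (fuel+1) cur i = manFuel fuel cur' ((m % 2 : Nat) : Int) := by
        show (if PySem.List.len cur = 1 then cur else _) = _
        rw [if_neg (by rw [hlencast]; exact_mod_cast (by omega : (m:Int) ≠ 1))]
        simp only [hlencast, hsl]
        rcases Nat.mod_two_eq_zero_or_one m with h | h <;> simp [h] <;> omega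
      rw [hstep, manAltGo, dif_neg (by omega : ¬ m ≤ 1)]
      have hinv' : ∀ j, j < cnt → cur'[j]? = ls[(off + stride * s) + (stride * 2) * j]? := by
        intro j hj
        have hidx : s + 2 * j < m := by omega
        have hj' : cur'[j]? = some (cur.getD (s + 2 * j) 0) := by
          rw [hcur', List.getElem?_map, List.getElem?_range hj]
          rfl
        rw [hj']
        have hc : cur[s + 2 * j]? = some (cur.getD (s + 2 * j) 0) := by
          rw [List.getD_eq_getElem?_getD, List.getElem?_eq_getElem (by omega)]
          simp
        have hv := hinv (s + 2 * j) hidx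
        rw [hc] at hv
        rw [hv]
        congr 1
        ring
      apply ih cnt cur' ls (off + stride * s) (stride * 2) ((m % 2 : Nat) : Int)
        (by omega) (by simp [hcur']) hcnt1 hinv'
      by_cases hc1 : cnt = 1
      · exact Or.inl hc1
      · right
        unfold pvClamp
        rw [if_pos (by positivity)]
        have : ((m % 2 : Nat) : Int).toNat = m % 2 := by omega
        omega

-- ===== VERDICT (by name: the statement is the Claim_ definition above) =====
theorem man_spec : Claim_equal_man := by
  intro ls index _ hpre
  unfold Spec_man man man_alt
  rcases hpre with ⟨hne, hcase⟩
  have hlen : 1 ≤ ls.length := List.length_pos_iff.mpr hne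
  by_cases h1 : ls.length = 1
  · simp [h1, manFuel, PySem.List.len]
  · rw [if_neg h1]
    apply key ls.length ls.length ls ls 0 1 index le_rfl rfl hlen
    · intro j hj; simp
    · right
      rcases hcase with h | h
      · exact absurd h h1
      · unfold pvClamp; split_ifs with hi <;> omega
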